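-- pv_equiv track=rewrite | github.com/study-for-interview/algorithm-study | hanjo/개인용/programmers/카카오/L2_프렌즈4블록/solution.py | delete_row_col
-- ===== SOURCE A (Python) =====
-- def delete_row_col(m, n, b_copy):
--     # 가로로 2개이상 연결안된 애들 삭제
--     for i in range(m):
--         sign = False
--         for j in range(n):
--             if b_copy[i][j] == "_":
--                 continue
--             if j==n-1 or b_copy[i][j] != b_copy[i][j+1]:
--                 if sign==True:
--                     sign = False
--                 else:
--                     b_copy[i][j]="_"
--             else:
--                 sign = True
--     # 세로로 2개이상 연결안된 애들 삭제
--     for j in range(n):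
--         sign = False
--         for i in range(m):
--             if b_copy[i][j] == "_":
--                 continue
--             if i==m-1 or b_copy[i][j] != b_copy[i+1][j]:
--                 if sign==True:
--                     sign = False
--                 else:
--                     b_copy[i][j]="_"
--             else:
--                 sign = True
--     return b_copy
-- ===== SOURCE B (Python) =====
-- def delete_row_col(m, n, b_copy):
--     # Run-length decomposition: replace every maximal run of length 1 (not '_')
--     # by '_', first along each row, then along each column of the mutated grid.
--     # Mutates b_copy in place (row objects are replaced, not mutated).
--     if m <= 0 or n <= 0:
--         return b_copy
--
--     def zap(cells):
--         out = []
--         k = 0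
--         L = len(cells)
--         while k < L:
--             r = k + 1
--             while r < L and cells[r] == cells[k]:
--                 r += 1
--             if r == k + 1 and cells[k] != "_":
--                 out.append("_")
--             else:
--                 out.extend(cells[k:r])
--             k = r
--         return out
--
--     for i in range(m):
--         row = [b_copy[i][j] for j in range(n)]
--         b_copy[i] = zap(row) + b_copy[i][len(row):]
--     for j in range(n):
--         col = [b_copy[i][j] for i in range(m)]
--         newcol = zap(col)
--         for i, v in enumerate(newcol):
--             b_copy[i][j] = v
--     return b_copy
-- ===== Notes on version B (the rewrite author's own statement) =====
-- stated objective: alternative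
-- what changed: B replaces A's carried sign-flag scan (nested index loops with a boolean run-state) by a run-length decomposition: each row, then each column, is split into maximal runs of equal cells and every length-1 non-'_' run is blanked, rows being rewritten by splicing and columns by extract-zap-write-back.
import Mathlib
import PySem

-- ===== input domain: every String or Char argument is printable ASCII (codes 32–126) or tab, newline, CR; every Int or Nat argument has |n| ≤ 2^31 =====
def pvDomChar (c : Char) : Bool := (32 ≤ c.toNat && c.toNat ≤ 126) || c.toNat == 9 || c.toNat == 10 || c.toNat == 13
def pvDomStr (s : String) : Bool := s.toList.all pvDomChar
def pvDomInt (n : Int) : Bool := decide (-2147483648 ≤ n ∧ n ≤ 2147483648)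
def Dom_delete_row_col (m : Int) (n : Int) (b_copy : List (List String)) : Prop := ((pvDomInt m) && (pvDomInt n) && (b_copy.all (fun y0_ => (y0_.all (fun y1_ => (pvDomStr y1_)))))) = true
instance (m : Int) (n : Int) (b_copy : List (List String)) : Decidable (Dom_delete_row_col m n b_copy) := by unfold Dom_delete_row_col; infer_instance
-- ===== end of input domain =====

-- B re-implements the grid pass by run-length decomposition (split each line into
-- maximal runs, blank length-1 non-'_' runs) instead of A's carried sign flag;
-- equivalence is about the RETURN value (both Pythons mutate b_copy in place,
-- though B replaces row objects where A writes single cells).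

-- ===== PORT A =====
-- b_copy[i][j] read / write (indices produced by range() are nonnegative)
def getCell (g : List (List String)) (i j : Int) : String :=
  PySem.List.pyGetD (PySem.List.pyGetD g i []) j ""

def setCell (g : List (List String)) (i j : Int) (v : String) : List (List String) :=
  PySem.List.pySetD g i (PySem.List.pySetD (PySem.List.pyGetD g i []) j v)

-- the body of A's inner horizontal loop (state: grid, sign)
def stepH (n i : Int) : (List (List String) × Bool) → Int → (List (List String) × Bool)
  | (g, sign), j =>
    if getCell g i j = "_" then (g, sign)
    else if j = n - 1 ∨ ¬(getCell g i j = getCell g i (j + 1)) then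
      if sign = true then (g, false) else (setCell g i j "_", sign)
    else (g, true)

-- the body of A's inner vertical loop
def stepV (m j : Int) : (List (List String) × Bool) → Int → (List (List String) × Bool)
  | (g, sign), i =>
    if getCell g i j = "_" then (g, sign)
    else if i = m - 1 ∨ ¬(getCell g i j = getCell g (i + 1) j) then
      if sign = true then (g, false) else (setCell g i j "_", sign)
    else (g, true)

def delete_row_col (m : Int) (n : Int) (b_copy : List (List String)) : List (List String) :=
  let g1 := (PySem.List.pyRange 0 m 1).foldl
    (fun g i => ((PySem.List.pyRange 0 n 1).foldl (stepH n i) (g, false)).1) b_copy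
  (PySem.List.pyRange 0 n 1).foldl
    (fun g j => ((PySem.List.pyRange 0 m 1).foldl (stepV m j) (g, false)).1) g1

-- ===== PORT B =====
-- B's zap: consume one maximal run at a time, appending to the accumulator `out`
def zapGo (acc : List String) : List String → List String
  | [] => acc
  | c :: t =>
    let run := t.takeWhile (fun x => x == c)
    let rest := t.dropWhile (fun x => x == c)
    if run = [] ∧ ¬(c = "_") then zapGo (acc ++ ["_"]) rest
    else zapGo (acc ++ (c :: run)) rest
termination_by l => l.length
decreasing_by
  all_goals simp only [List.length_cons]
  all_goals exact Nat.lt_succ_of_le (List.length_dropWhile_le _ _)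

def delete_row_col_alt (m : Int) (n : Int) (b_copy : List (List String)) : List (List String) :=
  if m ≤ 0 ∨ n ≤ 0 then b_copy
  else
    let g1 := (PySem.List.pyRange 0 m 1).foldl
      (fun g i =>
        let row := (PySem.List.pyRange 0 n 1).map (fun j => getCell g i j)
        PySem.List.pySetD g i
          (zapGo [] row ++
            PySem.List.slice (PySem.List.pyGetD g i []) (some (PySem.List.len row)) none)) b_copy
    (PySem.List.pyRange 0 n 1).foldl
      (fun g j =>
        let col := (PySem.List.pyRange 0 m 1).map (fun i => getCell g i j)
        (PySem.List.enumerate (zapGo [] col) 0).foldl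
          (fun g p => setCell g p.1 j p.2) g) g1

-- ===== PRECONDITION & SPEC =====
-- Pre_ is exactly where Python A returns: when both loop bounds are positive the
-- grid must have at least m rows and each of the first m rows at least n cells
-- (otherwise A raises IndexError); with a non-positive bound no cell is touched.
def Pre_delete_row_col (m : Int) (n : Int) (b_copy : List (List String)) : Prop :=
  0 < m → 0 < n →
    (m ≤ (b_copy.length : Int) ∧ ∀ r ∈ b_copy.take m.toNat, n ≤ (r.length : Int))
instance (m : Int) (n : Int) (b_copy : List (List String)) : Decidable (Pre_delete_row_col m n b_copy) := by
  unfold Pre_delete_row_col; infer_instance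

def pvWitness_delete_row_col : Int × Int × List (List String) :=
  (2, 2, [["a", "a"], ["b", "c"]])

def Spec_delete_row_col (m : Int) (n : Int) (b_copy : List (List String)) (out : List (List String)) : Prop := out = delete_row_col_alt m n b_copy
instance (m : Int) (n : Int) (b_copy : List (List String)) (out : List (List String)) : Decidable (Spec_delete_row_col m n b_copy out) := by unfold Spec_delete_row_col; infer_instance

-- ===== CLAIM (what is proved, stated in full; the proofs are below) =====
def Claim_equal_delete_row_col : Prop := ∀ (m : Int) (n : Int) (b_copy : List (List String)), Dom_delete_row_col m n b_copy → Pre_delete_row_col m n b_copy → Spec_delete_row_col m n b_copy (delete_row_col m n b_copy)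

-- ===== LEMMAS AND PROOFS =====

-- the pure effect of one line-scan of A: mark maximal length-1 non-'_' runs
def aScanPure : Bool → List String → List String
  | _, [] => []
  | s, c :: w =>
    if c = "_" then c :: aScanPure s w
    else if w.head? = some c then c :: aScanPure true w
    else (if s then c else "_") :: aScanPure false w

-- the index list [k, k+1, …, k+L-1] (range(…) after splitting off the prefix)
theorem aScanPure_cons (s : Bool) (c : String) (w : List String) :
    aScanPure s (c :: w) = if c = "_" then c :: aScanPure s w
    else if w.head? = some c then c :: aScanPure true w
    else (if s then c else "_") :: aScanPure false w := rfl

theorem zapGo_nil (acc : List String) : zapGo acc [] = acc := by simp [zapGo]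

theorem zapGo_cons (acc : List String) (c : String) (t : List String) :
    zapGo acc (c :: t) =
      if t.takeWhile (fun x => x == c) = [] ∧ ¬(c = "_")
      then zapGo (acc ++ ["_"]) (t.dropWhile (fun x => x == c))
      else zapGo (acc ++ (c :: t.takeWhile (fun x => x == c))) (t.dropWhile (fun x => x == c)) := by
  rw [zapGo]

def intRange : Nat → Nat → List Int
  | _, 0 => []
  | k, L + 1 => (k : Int) :: intRange (k + 1) L

-- sequential column write-back: cells k, k+1, … of column j get the given values
def colWriteFrom (j : Int) : List (List String) → Nat → List String → List (List String)
  | g, _, [] => g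
  | g, k, x :: w => colWriteFrom j (setCell g (k : Int) j x) (k + 1) w

theorem length_aScanPure (s : Bool) (l : List String) : (aScanPure s l).length = l.length := by
  induction l generalizing s with
  | nil => rfl
  | cons c w ih =>
    simp only [aScanPure]
    split_ifs <;> simp [ih]

theorem pyRange_eq_intRange : ∀ (L k : Nat),
    PySem.List.pyRange (k : Int) ((k + L : Nat) : Int) 1 = intRange k L := by
  intro L
  induction L with
  | zero => intro k; simp [PySem.List.pyRange_one_eq_nil, intRange]
  | succ L ih =>
    intro k
    rw [PySem.List.pyRange_one_cons (by push_cast; omega)]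
    have h1 : ((k : Int) + 1) = ((k + 1 : Nat) : Int) := by push_cast; ring
    have h2 : ((k + (L + 1) : Nat) : Int) = ((k + 1 + L : Nat) : Int) := by push_cast; ring
    rw [h1, h2, ih (k + 1)]
    rfl

theorem pyRange_nonneg_eq_intRange (m : Int) (hm : 0 ≤ m) :
    PySem.List.pyRange 0 m 1 = intRange 0 m.toNat := by
  have := pyRange_eq_intRange m.toNat 0
  simpa [Int.toNat_of_nonneg hm] using this

theorem length_intRange : ∀ (L k : Nat), (intRange k L).length = L := by
  intro L
  induction L with
  | zero => intro k; rfl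
  | succ L ih => intro k; simp [intRange, ih]

theorem getElem_intRange : ∀ (L k t : Nat) (ht : t < (intRange k L).length),
    (intRange k L)[t] = ((k + t : Nat) : Int) := by
  intro L
  induction L with
  | zero => intro k t ht; simp [length_intRange] at ht
  | succ L ih =>
    intro k t ht
    cases t with
    | zero => simp [intRange]
    | succ t =>
      have ht' : t < (intRange (k + 1) L).length := by
        simp [length_intRange] at ht ⊢; omega
      simp only [intRange, List.getElem_cons_succ, ih (k+1) t ht']
      congr 1
      omega

theorem mem_intRange : ∀ (L k : Nat) (x : Int), x ∈ intRange k L → ∃ t : Nat, t < L ∧ x = ((k + t : Nat) : Int) := by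
  intro L
  induction L with
  | zero => intro k x hx; simp [intRange] at hx
  | succ L ih =>
    intro k x hx
    simp only [intRange, List.mem_cons] at hx
    rcases hx with rfl | hx
    · exact ⟨0, by omega, by simp⟩
    · obtain ⟨t, ht, rfl⟩ := ih (k + 1) x hx
      exact ⟨t + 1, by omega, by push_cast; ring_nf⟩

-- foldl congruence with an invariant
theorem foldl_inv {α σ : Type*} (P : σ → Prop) (f1 f2 : σ → α → σ) :
    ∀ (l : List α) (s : σ), P s →
    (∀ s a, P s → a ∈ l → f1 s a = f2 s a ∧ P (f1 s a)) →
    l.foldl f1 s = l.foldl f2 s ∧ P (l.foldl f1 s) := by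
  intro l
  induction l with
  | nil => intro s hs _; exact ⟨rfl, hs⟩
  | cons a t ih =>
    intro s hs h
    obtain ⟨heq, hp⟩ := h s a hs (by simp)
    obtain ⟨he, hP⟩ := ih (f1 s a) hp (fun s' a' hs' ha' => h s' a' hs' (by simp [ha']))
    simp only [List.foldl_cons, ← heq]
    exact ⟨he, hP⟩

-- getD / set on an appended prefix
theorem getD_append_add (pre : List String) : ∀ (t : List String) (k : Nat) (d : String),
    (pre ++ t).getD (pre.length + k) d = t.getD k d := by
  induction pre with
  | nil => intro t k d; simp
  | cons x p ih => intro t k d; simpa [Nat.succ_add] using ih t k d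

theorem set_append_self (pre : List String) : ∀ (t : List String) (x : String),
    (pre ++ t).set pre.length x = pre ++ t.set 0 x := by
  induction pre with
  | nil => intro t x; simp
  | cons y p ih => intro t x; simp [ih]

theorem set_getD_self' (g : List (List String)) (i : Nat) : g.set i (g.getD i []) = g := by
  by_cases h : i < g.length
  · rw [List.getD_eq_getElem g [] h]; exact List.set_getElem_self h
  · exact List.set_eq_of_length_le (by omega)

theorem getD_set_self (g : List (List String)) (i : Nat) (r : List String) (h : i < g.length) :
    (g.set i r).getD i [] = r := by
  rw [List.getD_eq_getElem?_getD, List.getElem?_set_self (by omega)]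
  rfl

theorem getD_set_ne (g : List (List String)) (i i' : Nat) (r : List String) (h : i ≠ i') :
    (g.set i r).getD i' [] = g.getD i' [] := by
  rw [List.getD_eq_getElem?_getD, List.getElem?_set_ne h, ← List.getD_eq_getElem?_getD]

theorem setCell_eq (g : List (List String)) (i j : Nat) (v : String) :
    setCell g (i : Int) (j : Int) v = g.set i ((g.getD i []).set j v) := by
  simp [setCell]

theorem getCell_eq (g : List (List String)) (i j : Nat) :
    getCell g (i : Int) (j : Int) = (g.getD i []).getD j "" := by
  simp [getCell]

theorem pySetD_pyGetD_self {α : Type} (xs : List α) (j : Int) (d : α) :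
    PySem.List.pySetD xs j (PySem.List.pyGetD xs j d) = xs := by
  unfold PySem.List.pySetD PySem.List.pyGetD PySem.List.pySet? PySem.List.pyGet?
  cases h : PySem.List.pyIdx? xs.length j with
  | none => simp
  | some k =>
    have hk : k < xs.length := by
      unfold PySem.List.pyIdx? at h
      split_ifs at h <;> simp_all <;> omega
    simp [List.getElem?_eq_getElem hk, List.set_getElem_self hk]

theorem setCell_getCell_self (g : List (List String)) (i : Nat) (j : Int) :
    setCell g (i : Int) j (getCell g (i : Int) j) = g := by
  unfold setCell getCell
  rw [pySetD_pyGetD_self, pySetD_pyGetD_self]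

theorem getCell_setCell_ne (g : List (List String)) (i i' : Nat) (j j' : Int) (v : String)
    (h : i ≠ i') :
    getCell (setCell g (i : Int) j v) (i' : Int) j' = getCell g (i' : Int) j' := by
  simp only [setCell, getCell, PySem.List.pySetD_natCast, PySem.List.pyGetD_natCast]
  rw [getD_set_ne _ _ _ _ h]

-- ---- zap = aScanPure ----

theorem skip_run : ∀ (u rest : List String) (s : Bool), (∀ x ∈ u, x = "_") →
    aScanPure s (u ++ rest) = u ++ aScanPure s rest := by
  intro u
  induction u with
  | nil => intro rest s _; simp
  | cons c u' ih =>
    intro rest s h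
    have hc : c = "_" := h c (by simp)
    simp only [List.cons_append, aScanPure, if_pos hc]
    rw [ih rest s (fun x hx => h x (by simp [hx]))]

theorem run_lemma : ∀ (t : List String) (c : String), ¬(c = "_") →
    aScanPure true (c :: t) =
      c :: t.takeWhile (fun x => x == c) ++ aScanPure false (t.dropWhile (fun x => x == c)) := by
  intro t
  induction t with
  | nil => intro c hc; simp [aScanPure, hc]
  | cons d t2 ih =>
    intro c hc
    by_cases hdc : d = c
    · subst hdc
      rw [aScanPure_cons, if_neg hc, if_pos (by simp), ih d hc]
      simp
    · have hbeq : (d == c) = false := by simp [hdc]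
      have hh : ¬ ((d :: t2).head? = some c) := by simp [hdc]
      rw [aScanPure_cons, if_neg hc, if_neg hh]
      simp [hbeq]

theorem zapGo_eq : ∀ (L : Nat) (l : List String), l.length ≤ L → ∀ (acc : List String),
    zapGo acc l = acc ++ aScanPure false l := by
  intro L
  induction L with
  | zero =>
    intro l hl acc
    have : l = [] := List.eq_nil_of_length_eq_zero (by omega)
    subst this
    simp [zapGo_nil, aScanPure]
  | succ L ih =>
    intro l hl acc
    match l with
    | [] => simp [zapGo_nil, aScanPure]
    | c :: t =>
      have hrest : (t.dropWhile (fun x => x == c)).length ≤ L := by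
        have := List.length_dropWhile_le (fun x => x == c) t
        simp at hl; omega
      by_cases hc : c = "_"
      · -- a '_' run: kept verbatim by both
        have hall : ∀ x ∈ c :: t.takeWhile (fun x => x == c), x = "_" := by
          intro x hx
          rcases List.mem_cons.mp hx with rfl | hx
          · exact hc
          · have := List.mem_takeWhile_imp hx
            subst hc; simpa using this
        rw [zapGo_cons, if_neg (by simp [hc]), ih _ hrest]
        have hsplit : c :: t = (c :: t.takeWhile (fun x => x == c)) ++ t.dropWhile (fun x => x == c) := by
          simp [List.takeWhile_append_dropWhile]
        conv_rhs => rw [hsplit]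
        rw [skip_run _ _ false hall]
        simp
      · by_cases hrun : t.takeWhile (fun x => x == c) = []
        · -- singleton run: marked
          rw [zapGo_cons, hrun, if_pos ⟨rfl, hc⟩, ih _ hrest]
          have hdrop : t.dropWhile (fun x => x == c) = t := by
            rcases t with _ | ⟨d, t2⟩
            · rfl
            · simp only [List.takeWhile_cons] at hrun
              by_cases h : (d == c) = true
              · simp [h] at hrun
              · simp only [eq_false_of_ne_true h] at hrun ⊢
                simp [eq_false_of_ne_true h]
          rw [hdrop]
          have hhead : ¬ (t.head? = some c) := by
            rcases t with _ | ⟨d, t2⟩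
            · simp
            · simp only [List.takeWhile_cons] at hrun
              by_cases h : (d == c) = true
              · simp [h] at hrun
              · simp only [List.head?_cons]
                intro hsd
                exact absurd (by simp [(Option.some.injEq _ _).mp hsd]) h
          simp [aScanPure, hc, hhead]
        · -- run of length ≥ 2: kept verbatim
          rw [zapGo_cons, if_neg (by simp [hrun]), ih _ hrest]
          obtain ⟨e, run', hrun'⟩ := List.exists_cons_of_ne_nil hrun
          have hhead : t.head? = some c := by
            rcases t with _ | ⟨d, t2⟩
            · simp at hrun'
            · simp only [List.takeWhile_cons] at hrun'
              by_cases h : (d == c) = true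
              · simp [beq_iff_eq.mp h]
              · simp [eq_false_of_ne_true h] at hrun'
          have : aScanPure false (c :: t) =
              c :: t.takeWhile (fun x => x == c) ++ aScanPure false (t.dropWhile (fun x => x == c)) := by
            simp only [aScanPure, if_neg hc, if_pos hhead]
            rcases t with _ | ⟨d, t2⟩
            · simp at hhead
            · have hd : d = c := by simpa using hhead
              subst hd
              rw [run_lemma t2 d hc]
              simp
          rw [this]
          simp

theorem zapGo_eq' (l : List String) : zapGo [] l = aScanPure false l := by
  simpa using zapGo_eq l.length l (le_refl _) []

-- ---- A's inner horizontal loop collapses to aScanPure on the row ----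

theorem H_go : ∀ (v pre suf : List String) (g : List (List String)) (i : Nat) (s : Bool) (n : Int),
    i < g.length → g.getD i [] = pre ++ v ++ suf → n = pre.length + v.length →
    ∃ s', (intRange pre.length v.length).foldl (stepH n (i : Int)) (g, s)
        = (g.set i (pre ++ aScanPure s v ++ suf), s') := by
  intro v
  induction v with
  | nil =>
    intro pre suf g i s n hi hrow _
    refine ⟨s, ?_⟩
    have ha : aScanPure s [] = [] := rfl
    simp only [List.length_nil, intRange, List.foldl_nil, ha, List.append_nil]
    have hrow' : g.getD i [] = pre ++ suf := by simpa using hrow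
    rw [← hrow', set_getD_self']
  | cons c w ih =>
    intro pre suf g i s n hi hrow hn
    simp only [List.length_cons, intRange, List.foldl_cons]
    have hget : getCell g (i : Int) ((pre.length : Nat) : Int) = c := by
      rw [getCell_eq, hrow, show pre ++ (c :: w) ++ suf = pre ++ (c :: (w ++ suf)) by simp,
        show pre.length = pre.length + 0 by omega, getD_append_add]
      rfl
    by_cases hc : c = "_"
    · -- skipped cell
      have hstep : stepH n (i : Int) (g, s) ((pre.length : Nat) : Int) = (g, s) := by
        simp only [stepH]; rw [hget, if_pos hc]
      rw [hstep]
      have hrow' : g.getD i [] = (pre ++ [c]) ++ w ++ suf := by rw [hrow]; simp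
      obtain ⟨s', hfold⟩ := ih (pre ++ [c]) suf g i s n hi hrow' (by simp at hn ⊢; omega)
      refine ⟨s', ?_⟩
      have hr : intRange (pre.length + 1) w.length = intRange (pre ++ [c]).length w.length := by simp
      rw [hr, hfold, aScanPure_cons, if_pos hc]
      simp
    · -- non-'_' cell: run-end test
      rcases w with _ | ⟨d, w2⟩
      · -- last considered cell: j = n-1
        have hcond : ((pre.length : Nat) : Int) = n - 1 := by simp at hn ⊢; omega
        cases s with
        | true =>
          have ha : aScanPure true [c] = [c] := by
            rw [aScanPure_cons, if_neg hc, if_neg (by simp)]; simp [aScanPure]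
          have hstep : stepH n (i : Int) (g, true) ((pre.length : Nat) : Int) = (g, false) := by
            simp only [stepH]; rw [hget, if_neg hc, if_pos (Or.inl hcond)]; simp
          refine ⟨false, ?_⟩
          rw [hstep]
          simp only [List.length_nil, intRange, List.foldl_nil, ha]
          rw [← hrow, set_getD_self']
        | false =>
          have ha : aScanPure false [c] = ["_"] := by
            rw [aScanPure_cons, if_neg hc, if_neg (by simp)]; simp [aScanPure]
          have hstep : stepH n (i : Int) (g, false) ((pre.length : Nat) : Int)
              = (setCell g (i : Int) ((pre.length : Nat) : Int) "_", false) := by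
            simp only [stepH]; rw [hget, if_neg hc, if_pos (Or.inl hcond)]; simp
          refine ⟨false, ?_⟩
          rw [hstep]
          simp only [List.length_nil, intRange, List.foldl_nil, ha]
          rw [setCell_eq, hrow]
          rw [show pre ++ [c] ++ suf = pre ++ (c :: suf) by simp, set_append_self]
          simp
      · -- a next considered cell exists: j ≠ n-1, compare with it
        have hne : ¬ (((pre.length : Nat) : Int) = n - 1) := by simp at hn ⊢; omega
        have hget2 : getCell g (i : Int) (((pre.length : Nat) : Int) + 1) = d := by
          have hcast : ((pre.length : Nat) : Int) + 1 = ((pre.length + 1 : Nat) : Int) := by push_cast; ring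
          rw [hcast, getCell_eq, hrow,
            show pre ++ (c :: (d :: w2)) ++ suf = pre ++ (c :: d :: (w2 ++ suf)) by simp,
            getD_append_add]
          rfl
        by_cases hcd : c = d
        · -- inside a run: set sign
          subst hcd
          have hstep : stepH n (i : Int) (g, s) ((pre.length : Nat) : Int) = (g, true) := by
            simp only [stepH]; rw [hget, hget2, if_neg hc, if_neg (by simp [hne])]
          rw [hstep]
          have hrow' : g.getD i [] = (pre ++ [c]) ++ (c :: w2) ++ suf := by rw [hrow]; simp
          obtain ⟨s', hfold⟩ := ih (pre ++ [c]) suf g i true n hi hrow' (by simp at hn ⊢; omega)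
          refine ⟨s', ?_⟩
          have hr : intRange (pre.length + 1) (c :: w2).length = intRange (pre ++ [c]).length (c :: w2).length := by simp
          have ha : aScanPure s (c :: c :: w2) = c :: aScanPure true (c :: w2) := by
            rw [aScanPure_cons, if_neg hc, if_pos (by simp)]
          rw [hr, hfold, ha]
          simp
        · -- run end
          have harun : aScanPure s (c :: d :: w2)
              = (if s then c else "_") :: aScanPure false (d :: w2) := by
            rw [aScanPure_cons, if_neg hc,
              if_neg (by simp only [List.head?_cons, Option.some.injEq]; exact fun h => hcd h.symm)]
          cases s with
          | true =>
            have hstep : stepH n (i : Int) (g, true) ((pre.length : Nat) : Int) = (g, false) := by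
              simp only [stepH]; rw [hget, hget2, if_neg hc, if_pos (Or.inr hcd)]; simp
            rw [hstep]
            have hrow' : g.getD i [] = (pre ++ [c]) ++ (d :: w2) ++ suf := by rw [hrow]; simp
            obtain ⟨s', hfold⟩ := ih (pre ++ [c]) suf g i false n hi hrow' (by simp at hn ⊢; omega)
            refine ⟨s', ?_⟩
            have hr : intRange (pre.length + 1) (d :: w2).length = intRange (pre ++ [c]).length (d :: w2).length := by simp
            rw [hr, hfold, harun]
            simp
          | false =>
            have hstep : stepH n (i : Int) (g, false) ((pre.length : Nat) : Int)
                = (setCell g (i : Int) ((pre.length : Nat) : Int) "_", false) := by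
              simp only [stepH]; rw [hget, hget2, if_neg hc, if_pos (Or.inr hcd)]; simp
            rw [hstep]
            set g2 := setCell g (i : Int) ((pre.length : Nat) : Int) "_" with hg2
            have hg2' : g2 = g.set i (pre ++ "_" :: (d :: w2 ++ suf)) := by
              rw [hg2, setCell_eq, hrow,
                show pre ++ (c :: d :: w2) ++ suf = pre ++ (c :: (d :: w2 ++ suf)) by simp,
                set_append_self]
              simp
            have hlen2 : i < g2.length := by rw [hg2']; simpa using hi
            have hrow2 : g2.getD i [] = (pre ++ ["_"]) ++ (d :: w2) ++ suf := by
              rw [hg2', getD_set_self _ _ _ hi]; simp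
            obtain ⟨s', hfold⟩ := ih (pre ++ ["_"]) suf g2 i false n hlen2 hrow2 (by simp at hn ⊢; omega)
            refine ⟨s', ?_⟩
            have hr : intRange (pre.length + 1) (d :: w2).length = intRange (pre ++ ["_"]).length (d :: w2).length := by simp
            rw [hr, hfold, harun, hg2']
            simp [List.set_set]

-- ---- A's inner vertical loop collapses to aScanPure on the column ----

theorem V_go : ∀ (v : List String) (k : Nat) (g : List (List String)) (s : Bool) (j m : Int),
    m = k + v.length →
    (∀ t : Nat, t < v.length → getCell g ((k + t : Nat) : Int) j = v.getD t "") →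
    ∃ s', (intRange k v.length).foldl (stepV m j) (g, s)
        = (colWriteFrom j g k (aScanPure s v), s') := by
  intro v
  induction v with
  | nil => intro k g s j m _ _; exact ⟨s, rfl⟩
  | cons c w ih =>
    intro k g s j m hm hread
    simp only [List.length_cons, intRange, List.foldl_cons]
    have hget : getCell g ((k : Nat) : Int) j = c := by
      have := hread 0 (by simp)
      simpa using this
    by_cases hc : c = "_"
    · have hstep : stepV m j (g, s) ((k : Nat) : Int) = (g, s) := by
        simp only [stepV]; rw [hget, if_pos hc]
      rw [hstep]
      obtain ⟨s', hfold⟩ := ih (k + 1) g s j m (by simp at hm ⊢; omega)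
        (fun t ht => by
          have := hread (t + 1) (by simp; omega)
          rw [show k + 1 + t = k + (t + 1) by omega]
          simpa using this)
      refine ⟨s', ?_⟩
      rw [hfold]
      have hcw : colWriteFrom j g k (aScanPure s (c :: w))
          = colWriteFrom j (setCell g ((k : Nat) : Int) j c) (k + 1) (aScanPure s w) := by
        rw [aScanPure_cons, if_pos hc]; rfl
      rw [hcw, ← hget, setCell_getCell_self]
    · rcases w with _ | ⟨d, w2⟩
      · have hcond : ((k : Nat) : Int) = m - 1 := by simp at hm ⊢; omega
        cases s with
        | true =>
          have hstep : stepV m j (g, true) ((k : Nat) : Int) = (g, false) := by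
            simp only [stepV]; rw [hget, if_neg hc, if_pos (Or.inl hcond)]; simp
          refine ⟨false, ?_⟩
          rw [hstep]
          simp only [List.length_nil, intRange, List.foldl_nil]
          have ha : aScanPure true [c] = [c] := by
            rw [aScanPure_cons, if_neg hc, if_neg (by simp)]; rfl
          rw [ha, show colWriteFrom j g k [c] = setCell g ((k : Nat) : Int) j c from rfl,
            ← hget, setCell_getCell_self]
        | false =>
          have hstep : stepV m j (g, false) ((k : Nat) : Int)
              = (setCell g ((k : Nat) : Int) j "_", false) := by
            simp only [stepV]; rw [hget, if_neg hc, if_pos (Or.inl hcond)]; simp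
          refine ⟨false, ?_⟩
          rw [hstep]
          simp only [List.length_nil, intRange, List.foldl_nil]
          have ha : aScanPure false [c] = ["_"] := by
            rw [aScanPure_cons, if_neg hc, if_neg (by simp)]; rfl
          rw [ha]
          rfl
      · have hne : ¬ (((k : Nat) : Int) = m - 1) := by simp at hm ⊢; omega
        have hget2 : getCell g (((k : Nat) : Int) + 1) j = d := by
          have h1 : ((k : Nat) : Int) + 1 = ((k + 1 : Nat) : Int) := by push_cast; ring
          have := hread 1 (by simp)
          rw [h1]
          simpa using this
        have hreads : ∀ t : Nat, t < (d :: w2).length →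
            getCell g ((k + 1 + t : Nat) : Int) j = (d :: w2).getD t "" := by
          intro t ht
          have := hread (t + 1) (by simp at ht ⊢; omega)
          rw [show k + 1 + t = k + (t + 1) by omega]
          simpa using this
        by_cases hcd : c = d
        · subst hcd
          have hstep : stepV m j (g, s) ((k : Nat) : Int) = (g, true) := by
            simp only [stepV]; rw [hget, hget2, if_neg hc, if_neg (by simp [hne])]
          rw [hstep]
          obtain ⟨s', hfold⟩ := ih (k + 1) g true j m (by simp at hm ⊢; omega) hreads
          refine ⟨s', hfold.trans ?_⟩
          have ha : aScanPure s (c :: c :: w2) = c :: aScanPure true (c :: w2) := by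
            rw [aScanPure_cons, if_neg hc, if_pos (by simp)]
          rw [ha, show colWriteFrom j g k (c :: aScanPure true (c :: w2))
              = colWriteFrom j (setCell g ((k : Nat) : Int) j c) (k + 1) (aScanPure true (c :: w2)) from rfl,
            ← hget, setCell_getCell_self]
        · have harun : aScanPure s (c :: d :: w2)
              = (if s then c else "_") :: aScanPure false (d :: w2) := by
            rw [aScanPure_cons, if_neg hc,
              if_neg (by simp only [List.head?_cons, Option.some.injEq]; exact fun h => hcd h.symm)]
          cases s with
          | true =>
            have hstep : stepV m j (g, true) ((k : Nat) : Int) = (g, false) := by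
              simp only [stepV]; rw [hget, hget2, if_neg hc, if_pos (Or.inr hcd)]; simp
            rw [hstep]
            obtain ⟨s', hfold⟩ := ih (k + 1) g false j m (by simp at hm ⊢; omega) hreads
            refine ⟨s', hfold.trans ?_⟩
            have ha : aScanPure true (c :: d :: w2) = c :: aScanPure false (d :: w2) := by
              rw [harun]; simp
            rw [ha, show colWriteFrom j g k (c :: aScanPure false (d :: w2))
                = colWriteFrom j (setCell g ((k : Nat) : Int) j c) (k + 1) (aScanPure false (d :: w2)) from rfl,
              ← hget, setCell_getCell_self]
          | false =>
            have hstep : stepV m j (g, false) ((k : Nat) : Int)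
                = (setCell g ((k : Nat) : Int) j "_", false) := by
              simp only [stepV]; rw [hget, hget2, if_neg hc, if_pos (Or.inr hcd)]; simp
            rw [hstep]
            set g2 := setCell g ((k : Nat) : Int) j "_" with hg2
            obtain ⟨s', hfold⟩ := ih (k + 1) g2 false j m (by simp at hm ⊢; omega)
              (fun t ht => by
                rw [hg2, getCell_setCell_ne _ _ _ _ _ _ (by omega)]
                exact hreads t ht)
            refine ⟨s', hfold.trans ?_⟩
            have ha : aScanPure false (c :: d :: w2) = "_" :: aScanPure false (d :: w2) := by
              rw [harun]; simp
            rw [ha]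
            rfl

-- B's enumerate write-back is colWriteFrom
theorem enum_fold_eq_colWriteFrom : ∀ (c : List String) (g : List (List String)) (k : Nat) (j : Int),
    (PySem.List.enumerate c ((k : Nat) : Int)).foldl (fun g p => setCell g p.1 j p.2) g
      = colWriteFrom j g k c := by
  intro c
  induction c with
  | nil => intro g k j; simp [PySem.List.enumerate_nil, colWriteFrom]
  | cons x w ih =>
    intro g k j
    rw [PySem.List.enumerate_cons]
    simp only [List.foldl_cons]
    have : ((k : Nat) : Int) + 1 = ((k + 1 : Nat) : Int) := by push_cast; ring
    rw [this, ih (setCell g (k : Int) j x) (k + 1) j]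
    rfl

-- reading n cells of a row by index is `take`
theorem map_getD_intRange (r : List String) : ∀ (L k : Nat), k + L ≤ r.length →
    (intRange k L).map (fun j => PySem.List.pyGetD r j "") = (r.drop k).take L := by
  intro L
  induction L with
  | zero => intro k _; simp [intRange]
  | succ L ih =>
    intro k hk
    have hk' : k < r.length := by omega
    simp only [intRange, List.map_cons]
    rw [List.drop_eq_getElem_cons hk']
    simp only [List.take_succ_cons]
    rw [ih (k + 1) (by omega)]
    congr 1
    simp [PySem.List.pyGetD_natCast, List.getElem?_eq_getElem hk']

-- shape invariant carried through the horizontal pass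
def Pinv (b g : List (List String)) : Prop :=
  g.length = b.length ∧ ∀ t : Nat, (g.getD t []).length = (b.getD t []).length

theorem mem_intRange0 (L : Nat) (x : Int) (hx : x ∈ intRange 0 L) :
    ∃ t : Nat, t < L ∧ x = ((t : Nat) : Int) := by
  obtain ⟨t, ht, rfl⟩ := mem_intRange L 0 x hx
  exact ⟨t, ht, by simp⟩

-- one horizontal step: A's sign-scan = B's zap-and-splice, preserving the shape
theorem Hstep_eq (m n : Int) (b : List (List String)) (hn : 0 < n)
    (hlen : m ≤ (b.length : Int)) (hrows : ∀ r ∈ b.take m.toNat, n ≤ (r.length : Int))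
    (g : List (List String)) (i : Int) (hg : Pinv b g) (hi : i ∈ intRange 0 m.toNat) :
    (List.foldl (stepH n i) (g, false) (intRange 0 n.toNat)).1
      = PySem.List.pySetD g i
          (zapGo [] (List.map (fun j => getCell g i j) (intRange 0 n.toNat)) ++
            PySem.List.slice (PySem.List.pyGetD g i [])
              (some (PySem.List.len (List.map (fun j => getCell g i j) (intRange 0 n.toNat)))) none)
    ∧ Pinv b ((List.foldl (stepH n i) (g, false) (intRange 0 n.toNat)).1) := by
  obtain ⟨t, ht, rfl⟩ := mem_intRange0 m.toNat i hi
  have htb : t < b.length := by omega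
  have htg : t < g.length := by rw [hg.1]; exact htb
  set r := g.getD t [] with hr
  have hrlen : n.toNat ≤ r.length := by
    have h2 : (b.getD t []) = b[t] := List.getD_eq_getElem b [] htb
    have h1 : r.length = b[t].length := by rw [hr, hg.2 t, h2]
    have h3 : b[t] ∈ b.take m.toNat := by
      have hlt : t < (b.take m.toNat).length := by simp [List.length_take]; omega
      have h4 : (b.take m.toNat)[t] = b[t] := by simp [List.getElem_take]
      rw [← h4]; exact List.getElem_mem hlt
    have h5 := hrows _ h3
    omega
  have hvlen : (r.take n.toNat).length = n.toNat := by simp [List.length_take]; omega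
  obtain ⟨s', hfold⟩ := H_go (r.take n.toNat) [] (r.drop n.toNat) g t false n htg
    (by rw [← hr]; simp) (by simp [hvlen]; omega)
  rw [show (([] : List String)).length = 0 from rfl, hvlen] at hfold
  have hfst : (List.foldl (stepH n ((t : Nat) : Int)) (g, false) (intRange 0 n.toNat)).1
      = g.set t (aScanPure false (r.take n.toNat) ++ r.drop n.toNat) := by
    rw [hfold]; simp
  have hrow_eq : List.map (fun j => getCell g ((t : Nat) : Int) j) (intRange 0 n.toNat)
      = r.take n.toNat := by
    have h6 := map_getD_intRange r n.toNat 0 (by omega)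
    simp only [List.drop_zero] at h6
    rw [← h6]
    unfold getCell
    simp only [PySem.List.pyGetD_natCast, ← hr]
  constructor
  · rw [hfst, hrow_eq, zapGo_eq']
    simp only [PySem.List.len_eq, hvlen, PySem.List.slice_from_natCast,
      PySem.List.pySetD_natCast, PySem.List.pyGetD_natCast, ← hr]
  · rw [hfst]
    constructor
    · simp [hg.1]
    · intro t'
      by_cases htt : t = t'
      · subst htt
        rw [getD_set_self _ _ _ htg]
        have : (aScanPure false (r.take n.toNat) ++ r.drop n.toNat).length = r.length := by
          simp [length_aScanPure, hvlen]
          omega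
        rw [this, hr]
        exact hg.2 t
      · rw [getD_set_ne _ _ _ _ htt]
        exact hg.2 t'

-- one vertical step: A's sign-scan down column j = B's zap-and-write-back
theorem Vstep_eq (m : Int) (hm : 0 < m) (g : List (List String)) (j : Int) :
    (List.foldl (stepV m j) (g, false) (intRange 0 m.toNat)).1
      = List.foldl (fun g p => setCell g p.1 j p.2) g
          (PySem.List.enumerate (zapGo [] (List.map (fun i => getCell g i j) (intRange 0 m.toNat))) 0) := by
  set col := List.map (fun i => getCell g i j) (intRange 0 m.toNat) with hcol
  have hclen : col.length = m.toNat := by simp [hcol, length_intRange]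
  obtain ⟨s', hfold⟩ := V_go col 0 g false j m (by simp [hclen]; omega)
    (fun t ht => by
      rw [List.getD_eq_getElem col "" ht]
      simp only [hcol, List.getElem_map]
      rw [getElem_intRange _ _ _ (by simpa [hcol] using ht)])
  rw [hclen] at hfold
  have hfst : (List.foldl (stepV m j) (g, false) (intRange 0 m.toNat)).1
      = colWriteFrom j g 0 (aScanPure false col) := by rw [hfold]
  rw [hfst, zapGo_eq']
  have henum := enum_fold_eq_colWriteFrom (aScanPure false col) g 0 j
  simp only [Nat.cast_zero] at henum
  rw [henum]

set_option maxHeartbeats 1000000 in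
theorem main_case (m n : Int) (b : List (List String)) (hm : 0 < m) (hn : 0 < n)
    (hlen : m ≤ (b.length : Int)) (hrows : ∀ r ∈ b.take m.toNat, n ≤ (r.length : Int)) :
    delete_row_col m n b = delete_row_col_alt m n b := by
  have hmr : PySem.List.pyRange 0 m 1 = intRange 0 m.toNat :=
    pyRange_nonneg_eq_intRange m (le_of_lt hm)
  have hnr : PySem.List.pyRange 0 n 1 = intRange 0 n.toNat :=
    pyRange_nonneg_eq_intRange n (le_of_lt hn)
  unfold delete_row_col delete_row_col_alt
  rw [if_neg (by omega)]
  simp only [hmr, hnr]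
  obtain ⟨hHfold, -⟩ := foldl_inv (Pinv b)
    (fun g i => (List.foldl (stepH n i) (g, false) (intRange 0 n.toNat)).1)
    (fun g i =>
      PySem.List.pySetD g i
        (zapGo [] (List.map (fun j => getCell g i j) (intRange 0 n.toNat)) ++
          PySem.List.slice (PySem.List.pyGetD g i [])
            (some (PySem.List.len (List.map (fun j => getCell g i j) (intRange 0 n.toNat)))) none))
    (intRange 0 m.toNat) b ⟨rfl, fun _ => rfl⟩
    (fun g i hg hi => Hstep_eq m n b hn hlen hrows g i hg hi)
  rw [hHfold]
  apply PySem.List.foldl_congr_mem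
  intro acc x _
  exact Vstep_eq m hm acc x

-- degenerate bounds: A touches nothing, B returns immediately
theorem degen_case (m n : Int) (b : List (List String)) (h : m ≤ 0 ∨ n ≤ 0) :
    delete_row_col m n b = delete_row_col_alt m n b := by
  have hb : delete_row_col_alt m n b = b := by
    rw [delete_row_col_alt, if_pos h]
  rw [hb]
  rcases h with hm | hn
  · simp [delete_row_col, PySem.List.pyRange_one_eq_nil hm]
  · simp [delete_row_col, PySem.List.pyRange_one_eq_nil hn]

-- ===== VERDICT (by name: the statement is the Claim_ definition above) =====
theorem delete_row_col_spec : Claim_equal_delete_row_col := by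
  intro m n b _ hpre
  unfold Spec_delete_row_col
  by_cases h : m ≤ 0 ∨ n ≤ 0
  · exact degen_case m n b h
  · have h1 : 0 < m := by omega
    have h2 : 0 < n := by omega
    obtain ⟨hlen, hrows⟩ := hpre h1 h2
    exact main_case m n b h1 h2 hlen hrows
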